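-- pv_equiv track=rewrite | github.com/JaehoonSong12/ydjs-projects | coding-python-recursion/q17.py | array220
-- ===== SOURCE A (Python) =====
-- def array220(nums: list, index: int) -> bool:
--     """
--     Description:
--         Given an array of integers, this function recursively checks
--         if any value in the array
--         is followed by a value that is exactly 10 times that value.
--         The recursion starts from
--         the given index and proceeds through the array.
--
--     Examples:
--         array220([1, 2, 20], 0) → True
--         array220([3, 30], 0) → True
--         array220([3], 0) → False
--
--     Instructions to run the tests via the CLI:
--         1. Open your terminal or command prompt.
--         2. Run the tests by executing: `python async-recursion/q17.py`
--
--     Args: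
--         nums (list): The input list of integers.
--         index (int): The current index to check.
--
--     Returns:
--         bool: True if the condition is met, otherwise False.
--     """
--     # Base case: your implementation and comment here.
--     if len(nums) == 0:
--         return False
--     if len(nums) == 1:
--         return False
--     if len(nums) == 2:
--         if nums[0] * 10 == nums[1]:
--             return True
--         return False
--     # Recursive case: your implementation and comment here.
--     first_ch, second_ch, rest = nums[index], nums[index + 1], nums[index + 2:]
--     # int, int, list
--     if first_ch * 10 == second_ch:
--         return True
--     new_lst = [second_ch] + rest
--     return array220(new_lst, 0)
-- ===== SOURCE B (Python) =====
-- def array220(nums: list, index: int) -> bool: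
--     n = len(nums)
--     if n < 2:
--         return False
--     if n == 2:
--         return nums[0] * 10 == nums[1]
--     first, second = nums[index], nums[index + 1]
--     if first * 10 == second:
--         return True
--     tail = [second] + nums[index + 2:]
--     return any(a * 10 == b for a, b in zip(tail, tail[1:]))
-- ===== Notes on version B (the rewrite author's own statement) =====
-- stated objective: faster
-- what changed: A recursively rebuilds a fresh list ([second]+rest) at every step; B replaces the whole recursion after the first check by a single linear any() scan over adjacent pairs of the same tail list.
import Mathlib
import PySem

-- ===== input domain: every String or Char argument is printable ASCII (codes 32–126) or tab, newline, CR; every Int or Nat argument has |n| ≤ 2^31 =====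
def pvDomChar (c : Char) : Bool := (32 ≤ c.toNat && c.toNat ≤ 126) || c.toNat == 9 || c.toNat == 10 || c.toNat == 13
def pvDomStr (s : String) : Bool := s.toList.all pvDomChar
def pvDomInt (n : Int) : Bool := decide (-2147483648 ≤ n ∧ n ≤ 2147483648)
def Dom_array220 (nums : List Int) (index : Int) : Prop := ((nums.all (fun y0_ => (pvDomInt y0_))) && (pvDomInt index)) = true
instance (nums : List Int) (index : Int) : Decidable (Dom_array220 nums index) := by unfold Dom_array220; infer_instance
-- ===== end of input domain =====

-- B replaces A's recursion (which rebuilds a fresh list each step) by one linear scan over adjacent pairs.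

-- ===== PORT A =====
-- Literal transliteration of A: base cases on length, then nums[index], nums[index+1],
-- rest = nums[index+2:], recurse on [second] + rest with index 0.
-- (pyGet? = none is Python's IndexError; those inputs are excluded by Pre_array220.)
def array220 (nums : List Int) (index : Int) : Bool :=
  if nums.length = 0 then false
  else if nums.length = 1 then false
  else if nums.length = 2 then
    decide (PySem.List.pyGetD nums 0 0 * 10 = PySem.List.pyGetD nums 1 0)
  else
    match PySem.List.pyGet? nums index, PySem.List.pyGet? nums (index + 1) with
    | some first, some second =>
      if first * 10 = second then true
      else array220 (second :: PySem.List.slice nums (some (index + 2)) none) 0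
    | _, _ => false      -- IndexError in Python; outside Pre_array220
termination_by ((if index = 0 then 0 else 1 : Nat), nums.length)
decreasing_by
  by_cases h : index = 0
  · subst h
    apply Prod.Lex.right
    rw [show ((0:Int) + 2) = (2:Int) by norm_num,
      PySem.List.slice_from _ (by norm_num : (0:Int) ≤ 2)]
    simp
    omega
  · exact Prod.Lex.left _ _ (by simp [h])

-- ===== PORT B =====
-- Transliteration of B: same base cases and first check, then a single any() over
-- zip(tail, tail[1:]) of the tail list — no recursion, no list rebuilding.
def array220_alt (nums : List Int) (index : Int) : Bool :=
  if nums.length < 2 then false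
  else if nums.length = 2 then
    decide (PySem.List.pyGetD nums 0 0 * 10 = PySem.List.pyGetD nums 1 0)
  else
    match PySem.List.pyGet? nums index with
    | none => false      -- IndexError in Python; outside Pre_array220
    | some first =>
      match PySem.List.pyGet? nums (index + 1) with
      | none => false    -- IndexError in Python; outside Pre_array220
      | some second =>
        if first * 10 = second then true
        else
          let tail := second :: PySem.List.slice nums (some (index + 2)) none
          (tail.zip tail.tail).any (fun p => p.1 * 10 == p.2)

-- ===== PRECONDITION & SPEC =====
-- Pre_ excludes exactly the inputs where A raises IndexError: lists of length ≥ 3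
-- with index (or index+1) outside Python's valid (negative-wrapping) index range.
def Pre_array220 (nums : List Int) (index : Int) : Prop :=
  3 ≤ nums.length → (-(nums.length : Int) ≤ index ∧ index ≤ (nums.length : Int) - 2)
instance (nums : List Int) (index : Int) : Decidable (Pre_array220 nums index) := by
  unfold Pre_array220; infer_instance
def pvWitness_array220 : List Int × Int := ([1, 2, 20], 0)
def Spec_array220 (nums : List Int) (index : Int) (out : Bool) : Prop := out = array220_alt nums index
instance (nums : List Int) (index : Int) (out : Bool) : Decidable (Spec_array220 nums index out) := by unfold Spec_array220; infer_instance

-- ===== CLAIM (what is proved, stated in full; the proofs are below) =====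
def Claim_equal_array220 : Prop := ∀ (nums : List Int) (index : Int), Dom_array220 nums index → Pre_array220 nums index → Spec_array220 nums index (array220 nums index)

-- ===== LEMMAS AND PROOFS =====

-- A's recursion from index 0 is exactly the adjacent-pairs scan B performs.
theorem array220_zero_eq_anyAdj (L : List Int) :
    array220 L 0 = (L.zip L.tail).any (fun p => p.1 * 10 == p.2) := by
  induction L with
  | nil => simp [array220]
  | cons a L ih =>
    match L with
    | [] => simp [array220]
    | [b] =>
      rw [array220]
      simp [PySem.List.pyGetD, Bool.beq_eq_decide_eq]
    | b :: c :: R =>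
      rw [array220]
      have hs : PySem.List.slice (a :: b :: c :: R) (some ((0:Int) + 2)) none = c :: R := by
        rw [show ((0:Int) + 2) = (2:Int) by norm_num,
          PySem.List.slice_from _ (by norm_num : (0:Int) ≤ 2)]
        rfl
      have hg0 : PySem.List.pyGet? (a :: b :: c :: R) (0 : Int) = some a := by
        simp [PySem.List.pyGet?_zero]
      have hg1 : PySem.List.pyGet? (a :: b :: c :: R) ((0:Int) + 1) = some b := by
        have : ((0:Int) + 1) = ((1:Nat) : Int) := by norm_num
        rw [this, PySem.List.pyGet?_natCast]; rfl
      rw [hg0, hg1, hs]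
      by_cases h : a * 10 = b
      · simp [h]
      · simp only [if_neg h]
        rw [ih]
        simp [h]

-- ===== VERDICT (by name: the statement is the Claim_ definition above) =====
theorem array220_spec : Claim_equal_array220 := by
  intro nums index _ hpre
  unfold Spec_array220
  rw [array220, array220_alt]
  by_cases h0 : nums.length = 0
  · simp [h0]
  · by_cases h1 : nums.length = 1
    · simp [h1]
    · by_cases h2 : nums.length = 2
      · simp [h2]
      · simp only [if_neg h0, if_neg h1, if_neg h2,
          if_neg (by omega : ¬ nums.length < 2)]
        obtain ⟨hlo, hhi⟩ := hpre (by omega)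
        obtain ⟨first, hf⟩ : ∃ x, PySem.List.pyGet? nums index = some x := by
          rcases hx : PySem.List.pyGet? nums index with _ | x
          · exfalso
            rw [PySem.List.pyGet?_eq_none_iff] at hx
            exact hx ⟨by omega, by omega⟩
          · exact ⟨x, rfl⟩
        obtain ⟨second, hsnd⟩ : ∃ x, PySem.List.pyGet? nums (index + 1) = some x := by
          rcases hx : PySem.List.pyGet? nums (index + 1) with _ | x
          · exfalso
            rw [PySem.List.pyGet?_eq_none_iff] at hx
            exact hx ⟨by omega, by omega⟩
          · exact ⟨x, rfl⟩
        rw [hf, hsnd]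
        by_cases h : first * 10 = second
        · simp [h]
        · simp only [if_neg h]
          exact array220_zero_eq_anyAdj _
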